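-- pv_equiv track=rewrite | github.com/Wuszt/AdventOfCode2022 | AOC_3/AOC_3/AOC_3.py | CalcScoreOfCommons
-- ===== SOURCE A (Python) =====
-- def CalcScoreOfCommons(substrings):
-- 	duplicates = set(substrings[0])
--
-- 	for substr in substrings:
-- 		duplicates = duplicates&set(substr)
--
-- 	score = 0
-- 	for d in duplicates:
-- 		if d.isupper():
-- 			score += 26
-- 		score += ord(d.lower()) - ord('a') + 1
-- 	return score
-- ===== SOURCE B (Python) =====
-- def CalcScoreOfCommons(substrings):
-- 	score = 0
-- 	seen = set()
-- 	for c in substrings[0]: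
-- 		if c not in seen:
-- 			seen.add(c)
-- 			if all(c in s for s in substrings):
-- 				if c.isupper():
-- 					score += 26
-- 				score += ord(c.lower()) - ord('a') + 1
-- 	return score
-- ===== Notes on version B (the rewrite author's own statement) =====
-- stated objective: faster
-- what changed: Replaces the fold of set intersections (one freshly built set per substring plus an intermediate intersection set each step) with a single pass over the first substring that tests each distinct character for membership in every substring.
import Mathlib
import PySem

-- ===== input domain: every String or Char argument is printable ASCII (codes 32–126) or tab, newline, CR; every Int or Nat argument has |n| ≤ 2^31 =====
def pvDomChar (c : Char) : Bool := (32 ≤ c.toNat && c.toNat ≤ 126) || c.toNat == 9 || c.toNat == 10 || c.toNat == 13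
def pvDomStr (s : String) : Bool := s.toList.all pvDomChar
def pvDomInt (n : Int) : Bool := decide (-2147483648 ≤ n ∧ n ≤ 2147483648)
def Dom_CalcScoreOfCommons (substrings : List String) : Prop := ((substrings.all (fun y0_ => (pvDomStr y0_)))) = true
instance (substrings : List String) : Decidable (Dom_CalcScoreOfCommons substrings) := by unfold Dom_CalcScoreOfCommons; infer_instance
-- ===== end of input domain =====

-- B replaces the fold of set intersections with a single pass over the first substring that
-- tests each distinct character for membership in every substring (alternative decomposition,
-- same return value; neither version mutates its argument).

-- ===== PORT A =====
def CalcScoreOfCommons (substrings : List String) : Int :=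
  match PySem.List.pyGet? substrings 0 with
  | none => 0  -- substrings[0] raises IndexError: excluded by Pre_
  | some s0 =>
    let duplicates : PySem.Set Char :=
      substrings.foldl
        (fun duplicates substr => PySem.Set.inter duplicates (PySem.Set.ofList substr.toList))
        (PySem.Set.ofList s0.toList)
    -- summing over the set: the result is order-independent, so Python's hash order is immaterial
    duplicates.foldl
      (fun score d =>
        (if PySem.Chars.isupper d then score + 26 else score)
          + (((PySem.Chars.lowerChar d).toNat : Int) - ('a'.toNat : Int) + 1))
      0

-- ===== PORT B =====
def CalcScoreOfCommons_alt (substrings : List String) : Int :=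
  match PySem.List.pyGet? substrings 0 with
  | none => 0  -- substrings[0] raises IndexError: excluded by Pre_
  | some first =>
    (first.toList.foldl
      (fun (st : PySem.Set Char × Int) c =>
        if PySem.Set.contains st.1 c then st
        else
          (PySem.Set.add st.1 c,
           if substrings.all (fun s => PySem.Chars.isIn [c] s.toList) then
             (if PySem.Chars.isupper c then st.2 + 26 else st.2)
               + (((PySem.Chars.lowerChar c).toNat : Int) - ('a'.toNat : Int) + 1)
           else st.2))
      (PySem.Set.empty, 0)).2

-- ===== PRECONDITION & SPEC =====
-- A evaluates substrings[0], which raises IndexError on the empty list: Pre_ excludes exactly that.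
def Pre_CalcScoreOfCommons (substrings : List String) : Prop := substrings ≠ []
instance (substrings : List String) : Decidable (Pre_CalcScoreOfCommons substrings) := by
  unfold Pre_CalcScoreOfCommons; infer_instance
def pvWitness_CalcScoreOfCommons : List String := ["abC", "bCa"]

def Spec_CalcScoreOfCommons (substrings : List String) (out : Int) : Prop := out = CalcScoreOfCommons_alt substrings
instance (substrings : List String) (out : Int) : Decidable (Spec_CalcScoreOfCommons substrings out) := by unfold Spec_CalcScoreOfCommons; infer_instance

-- ===== CLAIM (what is proved, stated in full; the proofs are below) =====
def Claim_equal_CalcScoreOfCommons : Prop := ∀ (substrings : List String), Dom_CalcScoreOfCommons substrings → Pre_CalcScoreOfCommons substrings → Spec_CalcScoreOfCommons substrings (CalcScoreOfCommons substrings)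

-- ===== LEMMAS AND PROOFS =====

-- the priority of one character
def pvPrio (d : Char) : Int :=
  (if PySem.Chars.isupper d then 26 else 0)
    + (((PySem.Chars.lowerChar d).toNat : Int) - ('a'.toNat : Int) + 1)

-- B's loop body, named for the proofs (definitionally the lambda in CalcScoreOfCommons_alt)
def pvStepB (substrings : List String) (st : PySem.Set Char × Int) (c : Char) :
    PySem.Set Char × Int :=
  if PySem.Set.contains st.1 c then st
  else
    (PySem.Set.add st.1 c,
     if substrings.all (fun s => PySem.Chars.isIn [c] s.toList) then
       (if PySem.Chars.isupper c then st.2 + 26 else st.2)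
         + (((PySem.Chars.lowerChar c).toNat : Int) - ('a'.toNat : Int) + 1)
     else st.2)

-- 'c in s' for a single character is list membership
theorem pv_isIn_singleton (c : Char) (l : List Char) :
    PySem.Chars.isIn [c] l = l.contains c := by
  rw [Bool.eq_iff_iff, PySem.Chars.isIn_iff_infix, List.contains_iff_mem]
  constructor
  · intro h; exact h.mem (by simp)
  · intro h
    obtain ⟨a, b, rfl⟩ := List.mem_iff_append.mp h
    exact ⟨a, b, by simp⟩

theorem pv_contains_add (s : PySem.Set Char) (c x : Char) :
    PySem.Set.contains (PySem.Set.add s c) x = (PySem.Set.contains s x || x == c) := by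
  rw [Bool.eq_iff_iff]
  simp [PySem.Set.mem_add]

theorem pv_discard_eq (s : PySem.Set Char) (c : Char) :
    PySem.Set.discard s c = s.filter (fun x => !(x == c)) := rfl

-- A's score loop is the sum of priorities
theorem pv_A_score (l : List Char) :
    ∀ score : Int,
      l.foldl
        (fun score d =>
          (if PySem.Chars.isupper d then score + 26 else score)
            + (((PySem.Chars.lowerChar d).toNat : Int) - ('a'.toNat : Int) + 1))
        score
      = score + (l.map pvPrio).sum := by
  induction l with
  | nil => intro score; simp
  | cons d l ih =>
    intro score
    simp only [List.foldl_cons, List.map_cons, List.sum_cons, ih, pvPrio]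
    split_ifs <;> ring

-- A's intersection loop is a filter of its seed
theorem pv_A_inter (L : List String) :
    ∀ init : PySem.Set Char,
      L.foldl (fun d s => PySem.Set.inter d (PySem.Set.ofList s.toList)) init
      = init.filter (fun c => L.all (fun s => s.toList.contains c)) := by
  induction L with
  | nil => intro init; simp
  | cons s L ih =>
    intro init
    simp only [List.foldl_cons, ih]
    show (List.filter _ (List.filter _ init)) = _
    rw [List.filter_filter]
    apply List.filter_congr
    intro x _
    simp only [List.all_cons, Bool.and_comm]
    congr 1
    rw [Bool.eq_iff_iff]
    simp [PySem.Set.mem_ofList]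

-- B's single pass sums priorities over the distinct unseen characters passing the all-test
theorem pv_B_loop (substrings : List String) (l : List Char) :
    ∀ (seen : PySem.Set Char) (score : Int),
      (l.foldl (pvStepB substrings) (seen, score)).2
      = score
        + (((PySem.Set.ofList l).filter
              (fun c => !(PySem.Set.contains seen c)
                          && substrings.all (fun s => PySem.Chars.isIn [c] s.toList))).map
             pvPrio).sum := by
  induction l with
  | nil => intro seen score; simp [PySem.Set.ofList_nil]
  | cons c l ih =>
    intro seen score
    rw [List.foldl_cons, PySem.Set.ofList_cons, pv_discard_eq, List.filter_cons,
      List.filter_filter]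
    cases h : PySem.Set.contains seen c with
    | true =>
      have hstep : pvStepB substrings (seen, score) c = (seen, score) := by
        unfold pvStepB
        rw [show PySem.Set.contains (seen, score).1 c = true from h]
        simp
      rw [hstep, ih, if_neg (by simp)]
      have hsame : List.filter
            (fun x => (!(PySem.Set.contains seen x)
                && substrings.all (fun s => PySem.Chars.isIn [x] s.toList)) && !(x == c))
            (PySem.Set.ofList l)
          = List.filter
            (fun x => !(PySem.Set.contains seen x)
                && substrings.all (fun s => PySem.Chars.isIn [x] s.toList))
            (PySem.Set.ofList l) := by
        apply List.filter_congr
        intro x _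
        cases hs : PySem.Set.contains seen x with
        | true => simp
        | false =>
          cases hxc : (x == c) with
          | true =>
            rw [beq_iff_eq.mp hxc, h] at hs
            exact absurd hs (by decide)
          | false => simp
      rw [hsame]
    | false =>
      have hstep : pvStepB substrings (seen, score) c
          = (PySem.Set.add seen c,
             if substrings.all (fun s => PySem.Chars.isIn [c] s.toList) then
               (if PySem.Chars.isupper c then score + 26 else score)
                 + (((PySem.Chars.lowerChar c).toNat : Int) - ('a'.toNat : Int) + 1)
             else score) := by
        unfold pvStepB
        rw [show PySem.Set.contains (seen, score).1 c = false from h]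
        simp
      rw [hstep, ih]
      have hrest :
          ((PySem.Set.ofList l).filter
              (fun x => !(PySem.Set.contains (PySem.Set.add seen c) x)
                          && substrings.all (fun s => PySem.Chars.isIn [x] s.toList)))
          = ((PySem.Set.ofList l).filter
              (fun x => (!(PySem.Set.contains seen x)
                          && substrings.all (fun s => PySem.Chars.isIn [x] s.toList))
                        && !(x == c))) := by
        apply List.filter_congr
        intro x _
        rw [pv_contains_add]
        cases PySem.Set.contains seen x with
        | true => rfl
        | false =>
          cases (x == c) with
          | true => simp
          | false => simp
      rw [hrest]
      cases hp : substrings.all (fun s => PySem.Chars.isIn [c] s.toList) with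
      | true =>
        rw [if_pos (show (true = true) from rfl),
          if_pos (show ((!false && true) = true) by decide), List.map_cons, List.sum_cons]
        simp only [pvPrio]
        split_ifs <;> ring
      | false =>
        rw [if_neg (show ¬(false = true) by decide),
          if_neg (show ¬((!false && false) = true) by decide)]

-- ===== VERDICT (by name: the statement is the Claim_ definition above) =====
theorem CalcScoreOfCommons_spec : Claim_equal_CalcScoreOfCommons := by
  intro substrings _ hpre
  unfold Spec_CalcScoreOfCommons
  cases substrings with
  | nil => exact absurd rfl hpre
  | cons s0 t =>
    have hget : PySem.List.pyGet? (s0 :: t) 0 = some s0 := by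
      simp [PySem.List.pyGet?, PySem.List.pyIdx?]
    have hB : CalcScoreOfCommons_alt (s0 :: t)
        = (s0.toList.foldl (pvStepB (s0 :: t)) (PySem.Set.empty, 0)).2 := by
      unfold CalcScoreOfCommons_alt pvStepB
      rw [hget]
    unfold CalcScoreOfCommons
    rw [hget, hB, pv_B_loop]
    simp only [pv_A_inter, pv_A_score, zero_add]
    have hfil : ((PySem.Set.ofList s0.toList).filter
          (fun c => (s0 :: t).all (fun s => s.toList.contains c)))
        = ((PySem.Set.ofList s0.toList).filter
          (fun c => !(PySem.Set.contains PySem.Set.empty c)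
                      && (s0 :: t).all (fun s => PySem.Chars.isIn [c] s.toList))) := by
      apply List.filter_congr
      intro x _
      have hempty : PySem.Set.contains (PySem.Set.empty (α := Char)) x = false := rfl
      simp only [pv_isIn_singleton, hempty, Bool.not_false, Bool.true_and]
    rw [hfil]
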